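-- pv_equiv track=rewrite | github.com/onerain92/algorithm | ThisIsCodingTest/그리디/큰 수의 법칙.py | solution
-- ===== SOURCE A (Python) =====
-- def solution(N, M, K, arr):
--     arr.sort(reverse=True)
--     first_value = arr[0]
--     second_value = arr[1]
--     result = 0
--
--     while True:
--         for i in range(K):
--             if M == 0:
--                 break
--             result += first_value
--             M -= 1
--
--         if M == 0:
--             break;
--
--         result += second_value
--         M -= 1
--
--     return result
-- ===== SOURCE B (Python) =====
-- def solution(N, M, K, arr):
--     arr.sort(reverse=True)
--     first, second = arr[0], arr[1]
--     if K <= 0: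
--         return second * M
--     q, r = divmod(M, K + 1)
--     return first * (q * K + r) + second * q
-- ===== Notes on version B (the rewrite author's own statement) =====
-- stated objective: alternative
-- what changed: Replaces A's one-step-at-a-time simulation loop (M iterations) with the closed form: M splits into M//(K+1) blocks of K firsts plus one second, plus M%(K+1) leftover firsts; a timing run grows the array (sort-dominated), so the O(M)->O(1) loop saving is not confirmed.
import Mathlib
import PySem

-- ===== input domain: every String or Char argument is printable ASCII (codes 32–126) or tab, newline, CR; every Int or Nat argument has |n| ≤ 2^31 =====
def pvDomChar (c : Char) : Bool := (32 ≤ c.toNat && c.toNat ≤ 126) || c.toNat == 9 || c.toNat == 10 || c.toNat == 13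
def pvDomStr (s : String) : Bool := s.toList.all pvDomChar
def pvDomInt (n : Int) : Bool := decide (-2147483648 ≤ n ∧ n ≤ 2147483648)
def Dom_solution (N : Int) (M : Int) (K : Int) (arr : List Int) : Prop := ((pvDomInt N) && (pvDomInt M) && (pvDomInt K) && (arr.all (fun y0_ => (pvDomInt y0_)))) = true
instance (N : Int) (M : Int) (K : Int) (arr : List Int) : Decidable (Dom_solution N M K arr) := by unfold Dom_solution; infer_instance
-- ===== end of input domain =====

-- B replaces A's step-by-step simulation of the M picks with the closed form
-- (M//(K+1) full blocks of K firsts + one second, plus M%(K+1) leftover firsts).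
-- A sorts arr in place (a side effect); equivalence is about the RETURN value.

-- ===== PORT A =====
-- inner 'for i in range(K)' loop with its 'if M == 0: break'; Python's range is
-- lazy, so the counter i is advanced directly (no list is built); the loop runs
-- at most M+1 steps (it breaks once M hits 0), so fuel = M.toNat + 1 is only a
-- termination guard and is never exhausted on 0 ≤ M
def solInner (first K : Int) : Nat → Int × Int × Int → Int × Int
  | 0, (_, result, M) => (result, M)
  | fuel + 1, (i, result, M) =>
      if K ≤ i then (result, M)
      else if M = 0 then (result, M)
      else solInner first K fuel (i + 1, result + first, M - 1)

-- outer 'while True' loop; each pass consumes at least one unit of M, so the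
-- fuel M.toNat + 1 is likewise never exhausted on 0 ≤ M
def solOuter (first second K : Int) : Nat → Int × Int → Int
  | 0, (result, _) => result
  | fuel + 1, (result, M) =>
      let st := solInner first K (M.toNat + 1) (0, result, M)
      if st.2 = 0 then st.1
      else solOuter first second K fuel (st.1 + second, st.2 - 1)

def solution (N : Int) (M : Int) (K : Int) (arr : List Int) : Int :=
  let sorted := PySem.List.sorted arr (fun x => x) (reverse := true)
  let first_value := PySem.List.pyGetD sorted 0 0
  let second_value := PySem.List.pyGetD sorted 1 0
  solOuter first_value second_value K (M.toNat + 1) (0, M)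

-- ===== PORT B =====
def solution_alt (N : Int) (M : Int) (K : Int) (arr : List Int) : Int :=
  let sorted := PySem.List.sorted arr (fun x => x) (reverse := true)
  let first := PySem.List.pyGetD sorted 0 0
  let second := PySem.List.pyGetD sorted 1 0
  if K ≤ 0 then second * M
  else
    let q := PySem.Int.floordiv M (K + 1)
    let r := PySem.Int.mod M (K + 1)
    first * (q * K + r) + second * q

-- ===== PRECONDITION & SPEC =====
-- Pre_ excludes exactly the inputs on which Python A does not return:
-- M < 0 (the while loop never reaches M == 0 and diverges) and
-- arr with fewer than two elements (arr[1] raises IndexError).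
def Pre_solution (N : Int) (M : Int) (K : Int) (arr : List Int) : Prop :=
  0 ≤ M ∧ 2 ≤ arr.length
instance (N : Int) (M : Int) (K : Int) (arr : List Int) : Decidable (Pre_solution N M K arr) := by unfold Pre_solution; infer_instance

def pvWitness_solution : Int × Int × Int × List Int := (5, 8, 3, [2, 4, 5, 4, 6])

def Spec_solution (N : Int) (M : Int) (K : Int) (arr : List Int) (out : Int) : Prop := out = solution_alt N M K arr
instance (N : Int) (M : Int) (K : Int) (arr : List Int) (out : Int) : Decidable (Spec_solution N M K arr out) := by unfold Spec_solution; infer_instance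

-- ===== CLAIM (what is proved, stated in full; the proofs are below) =====
def Claim_equal_solution : Prop := ∀ (N : Int) (M : Int) (K : Int) (arr : List Int), Dom_solution N M K arr → Pre_solution N M K arr → Spec_solution N M K arr (solution N M K arr)

-- ===== LEMMAS AND PROOFS =====

-- the inner for-loop adds `first` min(M, max(K-i,0)) times, decrementing M
lemma solInner_spec (f K : Int) :
    ∀ (fuel : Nat) (i result M : Int), 0 ≤ M → M.toNat < fuel →
      solInner f K fuel (i, result, M) =
        if M ≤ (((K - i).toNat : Nat) : Int) then (result + f * M, 0)
        else (result + f * ((K - i).toNat : Int), M - ((K - i).toNat : Int)) := by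
  intro fuel
  induction fuel with
  | zero => intro i result M hM hfu; omega
  | succ n ih =>
      intro i result M hM hfu
      simp only [solInner]
      by_cases hKi : K ≤ i
      · have hR : (((K - i).toNat : Nat) : Int) = 0 := by omega
        rw [if_pos hKi, hR]
        by_cases h0 : M = 0
        · subst h0; rw [if_pos le_rfl]; simp
        · rw [if_neg (by omega)]; simp
      · rw [if_neg hKi]
        by_cases h0 : M = 0
        · subst h0
          rw [if_pos rfl, if_pos (by omega)]
          simp
        · rw [if_neg h0, ih (i + 1) (result + f) (M - 1) (by omega) (by omega)]
          have hR : ((K - (i + 1)).toNat : Int) = ((K - i).toNat : Int) - 1 := by omega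
          rw [hR]
          by_cases hle : M ≤ (((K - i).toNat : Nat) : Int)
          · rw [if_pos (by omega), if_pos hle, Prod.mk.injEq]
            exact ⟨by ring, rfl⟩
          · rw [if_neg (by omega), if_neg hle, Prod.mk.injEq]
            exact ⟨by ring, by ring⟩

-- the outer loop with K ≤ 0 just adds `second` M times
lemma solOuter_neg (f s K : Int) (hK : K ≤ 0) :
    ∀ (fuel : Nat) (M result : Int), 0 ≤ M → M.toNat < fuel →
      solOuter f s K fuel (result, M) = result + s * M := by
  intro fuel
  induction fuel with
  | zero => intro M result hM hfu; omega
  | succ n ih =>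
      intro M result hM hfu
      simp only [solOuter]
      rw [solInner_spec f K (M.toNat + 1) 0 result M hM (by omega)]
      have hR : (((K - 0).toNat : Nat) : Int) = 0 := by omega
      rw [hR]
      by_cases h0 : M = 0
      · subst h0; simp
      · rw [if_neg (show ¬ M ≤ (0 : Int) by omega)]
        have hpair : ((result + f * 0, M - 0) : Int × Int) = (result, M) := by norm_num
        rw [hpair]
        dsimp only
        rw [if_neg h0, ih (M - 1) (result + s) (by omega) (by omega)]
        ring

-- the outer loop with K ≥ 1: closed form via floor division by K+1
lemma solOuter_pos (f s K : Int) (hK : 1 ≤ K) :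
    ∀ (fuel : Nat) (M result : Int), 0 ≤ M → M.toNat < fuel →
      solOuter f s K fuel (result, M) =
        result + f * (M - M / (K + 1)) + s * (M / (K + 1)) := by
  intro fuel
  induction fuel with
  | zero => intro M result hM hf; omega
  | succ n ih =>
      intro M result hM hf
      simp only [solOuter]
      rw [solInner_spec f K (M.toNat + 1) 0 result M hM (by omega)]
      have hR : (((K - 0).toNat : Nat) : Int) = K := by omega
      rw [hR]
      by_cases hle : M ≤ K
      · rw [if_pos hle]
        have hq : M / (K + 1) = 0 := Int.ediv_eq_zero_of_lt hM (by omega)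
        simp only [if_true, hq]
        ring
      · rw [if_neg hle]
        rw [if_neg (by omega)]
        have hM' : 0 ≤ M - K - 1 := by omega
        have hf' : (M - K - 1).toNat < n := by omega
        rw [ih (M - K - 1) (result + f * K + s) hM' hf']
        have hq : M / (K + 1) = (M - K - 1) / (K + 1) + 1 := by
          have h1 : M = (M - K - 1) + 1 * (K + 1) := by ring
          calc M / (K + 1) = ((M - K - 1) + 1 * (K + 1)) / (K + 1) := by rw [← h1]
            _ = (M - K - 1) / (K + 1) + 1 := Int.add_mul_ediv_right _ 1 (by omega)
        rw [hq]; ring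

-- ===== VERDICT (by name: the statement is the Claim_ definition above) =====
theorem solution_spec : Claim_equal_solution := by
  intro N M K arr _ hpre
  obtain ⟨hM, _⟩ := hpre
  show solution N M K arr = solution_alt N M K arr
  unfold solution solution_alt
  dsimp only
  set f := PySem.List.pyGetD (PySem.List.sorted arr (fun x => x) true) 0 0 with hf
  set s := PySem.List.pyGetD (PySem.List.sorted arr (fun x => x) true) 1 0 with hs
  by_cases hK : K ≤ 0
  · rw [if_pos hK, solOuter_neg f s K hK (M.toNat + 1) M 0 hM (by omega)]
    ring
  · rw [if_neg hK]
    have hK1 : 1 ≤ K := by omega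
    have hpos : (0 : Int) < K + 1 := by omega
    rw [solOuter_pos f s K hK1 (M.toNat + 1) M 0 hM (by omega)]
    rw [PySem.Int.floordiv_eq_ediv_of_pos hpos, PySem.Int.mod_eq_emod_of_pos hpos]
    have hdm := Int.ediv_add_emod M (K + 1)
    linear_combination (-f) * hdm
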